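-- pv_equiv track=rewrite | github.com/niranta-life/adoc-migration-toolkit | src/adoc_migration_toolkit/execution/command_parsing.py | parse_custom_sql_check_command
-- ===== SOURCE A (Python) =====
-- def parse_custom_sql_check_command(command: str) -> tuple:
--     """Parse a custom-sql-check command string into components.
--
--     Args:
--         command: Command string like "custom-sql-check [--quiet] [--verbose] [--parallel]"
--     Returns:
--         Tuple of (parallel_mode, verbose_mode, quiet_mode)
--     """
--     parts = command.strip().split()
--     if not parts or parts[0].lower() != 'custom-sql-check':
--         return False, False, False
--
--     parallel_mode = False
--     verbose_mode = False
--     quiet_mode = False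
--
--     i = 1
--     while i < len(parts):
--         if parts[i] == '--parallel':
--             parallel_mode = True
--             parts.remove('--parallel')
--         elif parts[i] == '--verbose':
--             verbose_mode = True
--             quiet_mode = False  # Verbose overrides quiet
--             parts.remove('--verbose')
--         elif parts[i] == '--quiet':
--             quiet_mode = True
--             verbose_mode = False  # Quiet overrides verbose
--             parts.remove('--quiet')
--         else:
--             i += 1
--
--     return parallel_mode, verbose_mode, quiet_mode
-- ===== SOURCE B (Python) =====
-- def parse_custom_sql_check_command(command: str) -> tuple:
--     parts = command.strip().split()
--     if not parts or parts[0].lower() != 'custom-sql-check':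
--         return False, False, False
--     args = parts[1:]
--     parallel_mode = '--parallel' in args
--     verbose_mode = False
--     quiet_mode = False
--     for tok in reversed(args):
--         if tok == '--verbose':
--             verbose_mode = True
--             break
--         if tok == '--quiet':
--             quiet_mode = True
--             break
--     return parallel_mode, verbose_mode, quiet_mode
-- ===== Notes on version B (the rewrite author's own statement) =====
-- stated objective: simpler
-- what changed: Replaces A's while-loop that mutates the token list with parts.remove() by a single membership test for --parallel plus a reverse early-exit scan that stops at the last --verbose/--quiet.
import Mathlib
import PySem

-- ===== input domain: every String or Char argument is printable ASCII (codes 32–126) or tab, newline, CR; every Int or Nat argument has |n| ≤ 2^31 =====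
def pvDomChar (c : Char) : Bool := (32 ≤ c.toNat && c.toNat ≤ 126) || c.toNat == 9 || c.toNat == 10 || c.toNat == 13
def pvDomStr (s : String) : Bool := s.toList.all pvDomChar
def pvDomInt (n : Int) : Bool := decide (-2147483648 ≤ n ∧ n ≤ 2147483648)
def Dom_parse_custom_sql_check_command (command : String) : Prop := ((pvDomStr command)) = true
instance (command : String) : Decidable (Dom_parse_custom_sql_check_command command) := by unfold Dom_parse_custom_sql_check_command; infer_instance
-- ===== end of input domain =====

-- B replaces A's while-loop-with-remove by a membership test for --parallel plus a reverse
-- early-exit scan for the last --verbose/--quiet (objective: simpler; same return value everywhere).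

-- ===== PORT A =====
-- the while loop: fuel bounds the steps (each step either removes an element or advances i)
def pvLoopA : Nat → List String → Nat → Bool → Bool → Bool → Bool × Bool × Bool
  | 0, _, _, p, v, q => (p, v, q)
  | fuel + 1, parts, i, p, v, q =>
    if i < parts.length then
      let t := parts.getD i ""
      if t = "--parallel" then
        pvLoopA fuel ((PySem.List.remove? parts "--parallel").getD parts) i true v q
      else if t = "--verbose" then
        pvLoopA fuel ((PySem.List.remove? parts "--verbose").getD parts) i p true false
      else if t = "--quiet" then
        pvLoopA fuel ((PySem.List.remove? parts "--quiet").getD parts) i p false true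
      else
        pvLoopA fuel parts (i + 1) p v q
    else (p, v, q)

def parse_custom_sql_check_command (command : String) : Bool × Bool × Bool :=
  let parts := PySem.Str.split₀ (PySem.Str.strip command)
  if parts = [] ∨ PySem.Str.lower (parts.getD 0 "") ≠ "custom-sql-check" then (false, false, false)
  else pvLoopA (2 * parts.length + 1) parts 1 false false false

-- ===== PORT B =====
-- reverse early-exit scan: first --verbose/--quiet met (= last in original order) wins
def pvScanVQ : List String → Bool × Bool
  | [] => (false, false)
  | t :: ts =>
    if t = "--verbose" then (true, false)
    else if t = "--quiet" then (false, true)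
    else pvScanVQ ts

def parse_custom_sql_check_command_alt (command : String) : Bool × Bool × Bool :=
  let parts := PySem.Str.split₀ (PySem.Str.strip command)
  if parts = [] ∨ PySem.Str.lower (parts.getD 0 "") ≠ "custom-sql-check" then (false, false, false)
  else
    let args := parts.drop 1
    let parallel_mode := args.contains "--parallel"
    let vq := pvScanVQ args.reverse
    (parallel_mode, vq.1, vq.2)

-- ===== PRECONDITION & SPEC =====
def Spec_parse_custom_sql_check_command (command : String) (out : Bool × Bool × Bool) : Prop := out = parse_custom_sql_check_command_alt command
instance (command : String) (out : Bool × Bool × Bool) : Decidable (Spec_parse_custom_sql_check_command command out) := by unfold Spec_parse_custom_sql_check_command; infer_instance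

-- ===== CLAIM (what is proved, stated in full; the proofs are below) =====
def Claim_equal_parse_custom_sql_check_command : Prop := ∀ (command : String), Dom_parse_custom_sql_check_command command → Spec_parse_custom_sql_check_command command (parse_custom_sql_check_command command)

-- ===== LEMMAS AND PROOFS =====

-- forward last-wins accumulation over the argument tokens (reference semantics of A's loop)
def pvF : List String → Bool → Bool → Bool → Bool × Bool × Bool
  | [], p, v, q => (p, v, q)
  | t :: ts, p, v, q =>
    if t = "--parallel" then pvF ts true v q
    else if t = "--verbose" then pvF ts p true false
    else if t = "--quiet" then pvF ts p false true
    else pvF ts p v q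

def pvIsFlag (t : String) : Prop := t = "--parallel" ∨ t = "--verbose" ∨ t = "--quiet"

theorem pv_erase_at (parts : List String) (i : Nat) (hi : i < parts.length) (t : String)
    (ht : parts[i] = t) (hpre : t ∉ parts.take i) :
    parts.erase t = parts.take i ++ parts.drop (i + 1) := by
  conv_lhs => rw [← List.take_append_drop i parts]
  rw [List.erase_append_right _ hpre, List.drop_eq_getElem_cons hi, ht, List.erase_cons_head]

theorem pvLoopA_eq (fuel : Nat) : ∀ (parts : List String) (i : Nat) (p v q : Bool),
    i ≤ parts.length → 2 * parts.length ≤ i + fuel →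
    (∀ t ∈ parts.take i, ¬ pvIsFlag t) →
    pvLoopA fuel parts i p v q = pvF (parts.drop i) p v q := by
  induction fuel with
  | zero =>
    intro parts i p v q hle hfuel _
    have : i = parts.length := by omega
    simp [pvLoopA, this, List.drop_length, pvF]
  | succ n ih =>
    intro parts i p v q hle hfuel hpre
    by_cases hi : i < parts.length
    · have hgetD : parts.getD i "" = parts[i] := List.getD_eq_getElem parts "" hi
      have hdrop : parts.drop i = parts[i] :: parts.drop (i + 1) := List.drop_eq_getElem_cons hi
      have hrem : ∀ t : String, parts[i] = t → pvIsFlag t →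
          (PySem.List.remove? parts t).getD parts = parts.take i ++ parts.drop (i + 1) := by
        intro t ht htf
        have hmem : t ∈ parts := ht ▸ List.getElem_mem hi
        have hnotpre : t ∉ parts.take i := fun hmem' => hpre t hmem' htf
        rw [PySem.List.remove?_eq_some_erase parts t hmem, Option.getD_some,
          pv_erase_at parts i hi t ht hnotpre]
      have hlen' : (parts.take i ++ parts.drop (i + 1)).length = parts.length - 1 := by
        simp [List.length_take, List.length_drop]; omega
      have htake' : (parts.take i ++ parts.drop (i + 1)).take i = parts.take i := by
        apply List.take_left'
        simp [List.length_take]; omega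
      have hdrop' : (parts.take i ++ parts.drop (i + 1)).drop i = parts.drop (i + 1) := by
        apply List.drop_left'
        simp [List.length_take]; omega
      rw [pvLoopA]
      simp only [if_pos hi, hgetD]
      by_cases h1 : parts[i] = "--parallel"
      · rw [if_pos h1, hrem _ h1 (Or.inl rfl), ih _ i true v q (by omega) (by omega)
          (by rw [htake']; exact hpre), hdrop', hdrop, h1]
        simp [pvF]
      · rw [if_neg h1]
        by_cases h2 : parts[i] = "--verbose"
        · rw [if_pos h2, hrem _ h2 (Or.inr (Or.inl rfl)), ih _ i p true false (by omega) (by omega)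
            (by rw [htake']; exact hpre), hdrop', hdrop, h2]
          simp [pvF]
        · rw [if_neg h2]
          by_cases h3 : parts[i] = "--quiet"
          · rw [if_pos h3, hrem _ h3 (Or.inr (Or.inr rfl)), ih _ i p false true (by omega) (by omega)
              (by rw [htake']; exact hpre), hdrop', hdrop, h3]
            simp [pvF]
          · rw [if_neg h3]
            rw [ih parts (i + 1) p v q (by omega) (by omega)]
            · rw [hdrop, pvF]
              simp [h1, h2, h3]
            · intro t hmem
              rw [List.take_add_one] at hmem
              simp at hmem
              rcases hmem with h | h
              · exact hpre t h
              · have : parts[i]? = some parts[i] := List.getElem?_eq_getElem hi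
                rw [this] at h
                simp at h
                subst h
                intro hf
                rcases hf with hf | hf | hf
                · exact h1 hf
                · exact h2 hf
                · exact h3 hf
    · have : i = parts.length := by omega
      rw [pvLoopA]
      simp [this, List.drop_length, pvF]

-- generalized reverse scan with explicit default
def pvScanVQD : List String → Bool × Bool → Bool × Bool
  | [], d => d
  | t :: ts, d =>
    if t = "--verbose" then (true, false)
    else if t = "--quiet" then (false, true)
    else pvScanVQD ts d

theorem pvScanVQ_eq (l : List String) : pvScanVQ l = pvScanVQD l (false, false) := by
  induction l with
  | nil => rfl
  | cons t ts ih => simp [pvScanVQ, pvScanVQD, ih]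

theorem pvScanVQD_snoc (xs : List String) (t : String) (d : Bool × Bool) :
    pvScanVQD (xs ++ [t]) d =
      pvScanVQD xs (if t = "--verbose" then (true, false)
        else if t = "--quiet" then (false, true) else d) := by
  induction xs with
  | nil => simp [pvScanVQD]
  | cons x xs ih => simp [pvScanVQD, ih]

theorem pvF_eq (l : List String) : ∀ (p v q : Bool),
    pvF l p v q = (p || l.contains "--parallel", (pvScanVQD l.reverse (v, q)).1,
      (pvScanVQD l.reverse (v, q)).2) := by
  induction l with
  | nil => intro p v q; simp [pvF, pvScanVQD]
  | cons t ts ih =>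
    intro p v q
    rw [pvF]
    simp only [List.reverse_cons, pvScanVQD_snoc]
    by_cases h1 : t = "--parallel"
    · subst h1; simp [ih]
    · by_cases h2 : t = "--verbose"
      · subst h2
        have h1' : ¬ (("--parallel" : String) = "--verbose") := by decide
        simp [h1', ih]
      · by_cases h3 : t = "--quiet"
        · subst h3
          have h1' : ¬ (("--parallel" : String) = "--quiet") := by decide
          simp [h1', ih]
        · have h1' : ¬ (("--parallel" : String) = t) := fun h => h1 h.symm
          simp [h1, h2, h3, h1', ih]

theorem pv_main (parts : List String) (hne : parts ≠ [])
    (hlow : PySem.Str.lower (parts.getD 0 "") = "custom-sql-check") :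
    pvLoopA (2 * parts.length + 1) parts 1 false false false =
      ((parts.drop 1).contains "--parallel",
       (pvScanVQ (parts.drop 1).reverse).1, (pvScanVQ (parts.drop 1).reverse).2) := by
  obtain ⟨x, xs, rfl⟩ := List.exists_cons_of_ne_nil hne
  have hxflag : ¬ pvIsFlag x := by
    intro h
    simp only [List.getD_cons_zero] at hlow
    rcases h with h | h | h <;> (rw [h] at hlow; revert hlow; decide)
  have htake1 : ∀ t ∈ (x :: xs).take 1, ¬ pvIsFlag t := by
    intro t hmem
    simp only [List.take_succ_cons, List.take_zero, List.mem_singleton] at hmem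
    subst hmem; exact hxflag
  rw [pvLoopA_eq (2 * (x :: xs).length + 1) (x :: xs) 1 false false false
      (by simp) (by simp; omega) htake1]
  rw [pvF_eq, pvScanVQ_eq]
  rfl

-- ===== VERDICT (by name: the statement is the Claim_ definition above) =====
theorem parse_custom_sql_check_command_spec : Claim_equal_parse_custom_sql_check_command := by
  intro command _
  unfold Spec_parse_custom_sql_check_command
  unfold parse_custom_sql_check_command parse_custom_sql_check_command_alt
  generalize PySem.Str.split₀ (PySem.Str.strip command) = parts
  by_cases hguard : parts = [] ∨ PySem.Str.lower (parts.getD 0 "") ≠ "custom-sql-check"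
  · rw [if_pos hguard, if_pos hguard]
  · rw [if_neg hguard, if_neg hguard]
    obtain ⟨hne, hlow⟩ := not_or.mp hguard
    exact pv_main parts hne (not_not.mp hlow)
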